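-- pv_equiv track=rewrite | github.com/fispurring/lightVT | service/translator/llm_helper.py | parse_translation_text
-- ===== SOURCE A (Python) =====
-- from typing import Dict, List, Callable, Any, Optional, Tuple, Any
--
-- def parse_translation_text(translated_text: str) -> List[str]:
--     """解析翻译文本，提取每条内容（支持 [[编号]] 格式）"""
--     lines = translated_text.strip().split("\n")
--     parsed_lines = []
--
--     current_line = ""
--     for line in lines:
--         line = line.strip()
--         # 检查是否是 [[编号]] 开头的行
--         if line.startswith("[[") and line.endswith("]]") and line[2:-2].isdigit():
--             # 如果当前行有内容，保存到结果中
--             if current_line: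
--                 parsed_lines.append(current_line.strip())
--             # 开始新的字幕内容
--             current_line = ""
--         else:
--             # 拼接当前行到字幕内容
--             current_line += " " + line
--
--     # 保存最后一条字幕内容
--     if current_line:
--         parsed_lines.append(current_line.strip())
--
--     return parsed_lines
-- ===== SOURCE B (Python) =====
-- def parse_translation_text(translated_text: str):
--     """Two-pointer run scan: skip marker lines, emit one joined entry per maximal run of non-marker lines."""
--     def is_marker(line):
--         return line.startswith("[[") and line.endswith("]]") and line[2:-2].isdigit()
--     lines = [l.strip() for l in translated_text.strip().split("\n")]
--     out = []
--     n = len(lines)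
--     i = 0
--     while i < n:
--         if is_marker(lines[i]):
--             i += 1
--             continue
--         j = i
--         while j < n and not is_marker(lines[j]):
--             j += 1
--         out.append(" ".join(lines[i:j]).strip())
--         i = j
--     return out
-- ===== Notes on version B (the rewrite author's own statement) =====
-- stated objective: alternative
-- what changed: Replaces A's single accumulator loop (grow current_line per line, flush at markers and at the end) by a two-pointer run scan: strip all lines once, then skip marker lines and emit one space-joined, stripped entry per maximal run of non-marker lines.
import Mathlib
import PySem

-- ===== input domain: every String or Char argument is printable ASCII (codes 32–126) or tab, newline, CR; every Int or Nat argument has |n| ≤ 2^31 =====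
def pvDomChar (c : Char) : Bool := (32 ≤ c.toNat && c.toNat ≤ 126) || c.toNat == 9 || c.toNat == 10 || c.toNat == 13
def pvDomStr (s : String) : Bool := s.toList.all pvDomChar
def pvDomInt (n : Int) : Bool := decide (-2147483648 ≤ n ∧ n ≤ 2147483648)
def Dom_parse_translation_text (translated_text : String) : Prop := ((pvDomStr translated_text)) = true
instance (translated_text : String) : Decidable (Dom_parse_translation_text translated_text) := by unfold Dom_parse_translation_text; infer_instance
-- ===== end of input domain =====

-- B replaces A's accumulator-and-flush loop by a run scan over the stripped lines: one entry per
-- maximal run of non-marker lines (objective: alternative decomposition, same cost).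

-- ===== PORT A =====
-- marker test: line.startswith("[[") and line.endswith("]]") and line[2:-2].isdigit()
def pvMarker (line : List Char) : Bool :=
  PySem.Chars.startswith line ['[', '['] && PySem.Chars.endswith line [']', ']'] &&
    PySem.Chars.strIsdigit (PySem.Chars.slice line (some 2) (some (-2)))

-- A's for-loop: state = (parsed_lines, current_line)
def pvALoop : List (List Char) → List (List Char) → List Char → List (List Char)
  | [], parsed, cur => if cur ≠ [] then parsed ++ [PySem.Chars.strip cur] else parsed
  | l :: ls, parsed, cur =>
    let l := PySem.Chars.strip l
    if pvMarker l then
      pvALoop ls (if cur ≠ [] then parsed ++ [PySem.Chars.strip cur] else parsed) []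
    else
      pvALoop ls parsed (cur ++ ' ' :: l)

def parse_translation_text (translated_text : String) : List String :=
  (pvALoop (PySem.Chars.splitOn (PySem.Chars.strip translated_text.toList) ['\n']) [] []).map
    String.ofList

-- ===== PORT B =====
-- B's outer while loop: skip a marker line; otherwise the inner while advances j over the maximal
-- run of non-marker lines (= takeWhile) and emits " ".join(lines[i:j]).strip(); i := j (= dropWhile).
def pvBScan : List (List Char) → List (List Char)
  | [] => []
  | l :: ls =>
    if pvMarker l then pvBScan ls
    else
      PySem.Chars.strip (PySem.Chars.join [' '] (l :: ls.takeWhile (fun x => !pvMarker x)))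
        :: pvBScan (ls.dropWhile (fun x => !pvMarker x))
termination_by ls => ls.length
decreasing_by
  · simp
  · have := List.length_dropWhile_le (p := fun x => !pvMarker x) (l := ls); simp at this ⊢; omega

def parse_translation_text_alt (translated_text : String) : List String :=
  (pvBScan ((PySem.Chars.splitOn (PySem.Chars.strip translated_text.toList) ['\n']).map
    PySem.Chars.strip)).map String.ofList

-- ===== PRECONDITION & SPEC =====
def Spec_parse_translation_text (translated_text : String) (out : List String) : Prop := out = parse_translation_text_alt translated_text
instance (translated_text : String) (out : List String) : Decidable (Spec_parse_translation_text translated_text out) := by unfold Spec_parse_translation_text; infer_instance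

-- ===== CLAIM (what is proved, stated in full; the proofs are below) =====
def Claim_equal_parse_translation_text : Prop := ∀ (translated_text : String), Dom_parse_translation_text translated_text → Spec_parse_translation_text translated_text (parse_translation_text translated_text)

-- ===== LEMMAS AND PROOFS =====

-- proof-side restatement of A's loop without the accumulator, on pre-stripped lines
def pvPend : List Char → List (List Char) → List (List Char)
  | cur, [] => if cur ≠ [] then [PySem.Chars.strip cur] else []
  | cur, l :: ls =>
    if pvMarker l then
      (if cur ≠ [] then [PySem.Chars.strip cur] else []) ++ pvPend [] ls
    else
      pvPend (cur ++ ' ' :: l) ls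

theorem pvALoop_eq_pend (ls : List (List Char)) :
    ∀ parsed cur, pvALoop ls parsed cur = parsed ++ pvPend cur (ls.map PySem.Chars.strip) := by
  induction ls with
  | nil => intro parsed cur; simp only [pvALoop]; split <;> simp [pvPend, *]
  | cons l ls ih =>
    intro parsed cur
    simp only [pvALoop, List.map_cons, pvPend]
    split
    · rw [ih]; split <;> simp
    · rw [ih]

theorem pvFold_join (rs : List (List Char)) :
    ∀ cur l, rs.foldl (fun c l => c ++ ' ' :: l) (cur ++ ' ' :: l) =
      cur ++ ' ' :: PySem.Chars.join [' '] (l :: rs) := by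
  induction rs with
  | nil => intro cur l; simp [PySem.Chars.join_singleton]
  | cons r rs ih =>
    intro cur l
    simp only [List.foldl_cons]
    rw [ih (cur ++ ' ' :: l) r, PySem.Chars.join_cons_cons]
    simp

theorem pvPend_run (run : List (List Char)) :
    ∀ cur rest, run ≠ [] → (∀ l ∈ run, pvMarker l = false) →
      (∀ h, rest.head? = some h → pvMarker h = true) →
      pvPend cur (run ++ rest) =
        PySem.Chars.strip (run.foldl (fun c l => c ++ ' ' :: l) cur) :: pvPend [] rest := by
  induction run with
  | nil => intro _ _ h; exact absurd rfl h
  | cons l rs ih =>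
    intro cur rest _ hrun hrest
    have hl : pvMarker l = false := hrun l (by simp)
    simp only [List.cons_append, pvPend, hl, Bool.false_eq_true, List.foldl_cons, reduceIte]
    rcases eq_or_ne rs [] with rfl | hne
    · simp only [List.nil_append, List.foldl_nil]
      cases rest with
      | nil => simp [pvPend]
      | cons r rt =>
        have hr : pvMarker r = true := hrest r (by simp)
        simp [pvPend, hr]
    · exact ih (cur ++ ' ' :: l) rest hne (fun x hx => hrun x (by simp [hx])) hrest

theorem pvStrip_space (s : List Char) : PySem.Chars.strip (' ' :: s) = PySem.Chars.strip s := by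
  simp [PySem.Chars.strip, PySem.Chars.lstrip, PySem.Chars.isspace]

theorem pvPend_eq_scan : ∀ n (xs : List (List Char)), xs.length ≤ n →
    pvPend [] xs = pvBScan xs := by
  intro n
  induction n with
  | zero =>
    intro xs h
    rw [List.length_eq_zero_iff.mp (Nat.le_zero.mp h)]
    simp [pvPend, pvBScan]
  | succ n ih =>
    intro xs h
    cases xs with
    | nil => simp [pvPend, pvBScan]
    | cons l ls =>
      by_cases hm : pvMarker l = true
      · simp only [pvPend, hm, if_pos, ne_eq, not_true_eq_false, reduceIte, List.nil_append]
        rw [pvBScan, if_pos hm]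
        exact ih ls (Nat.le_of_succ_le_succ (by simpa using h))
      · have hm' : pvMarker l = false := by simpa using hm
        have hsplit : ls = ls.takeWhile (fun x => !pvMarker x) ++ ls.dropWhile (fun x => !pvMarker x) :=
          (List.takeWhile_append_dropWhile).symm
        have hrun : ∀ x ∈ l :: ls.takeWhile (fun x => !pvMarker x), pvMarker x = false := by
          intro x hx
          rcases List.mem_cons.mp hx with rfl | hx
          · exact hm'
          · simpa using List.mem_takeWhile_imp hx
        have hrest : ∀ x, (ls.dropWhile (fun x => !pvMarker x)).head? = some x → pvMarker x = true := by
          intro x hx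
          have h2 := List.head?_dropWhile_not (p := fun x => !pvMarker x) (l := ls)
          rw [hx] at h2
          simp at h2
          exact h2
        have hkey := pvPend_run (l :: ls.takeWhile (fun x => !pvMarker x)) []
          (ls.dropWhile (fun x => !pvMarker x)) (by simp) hrun hrest
        conv_lhs => rw [show (l :: ls : List (List Char)) =
          (l :: ls.takeWhile (fun x => !pvMarker x)) ++ ls.dropWhile (fun x => !pvMarker x) by
            exact congrArg (l :: ·) hsplit]
        rw [hkey]
        rw [pvBScan, if_neg (by simp [hm'])]
        have hfold := pvFold_join (ls.takeWhile (fun x => !pvMarker x)) [] l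
        simp only [List.foldl_cons, List.nil_append] at hfold ⊢
        rw [hfold, pvStrip_space]
        congr 1
        refine ih _ ?_
        have := List.length_dropWhile_le (p := fun x => !pvMarker x) (l := ls)
        simp only [List.length_cons] at h
        omega

-- ===== VERDICT (by name: the statement is the Claim_ definition above) =====
theorem parse_translation_text_spec : Claim_equal_parse_translation_text := by
  intro t _
  unfold Spec_parse_translation_text parse_translation_text parse_translation_text_alt
  rw [pvALoop_eq_pend, List.nil_append,
    pvPend_eq_scan ((PySem.Chars.splitOn (PySem.Chars.strip t.toList) ['\n']).map PySem.Chars.strip).length _ (by simp)]
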